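-- pv_equiv track=rewrite | github.com/Ckevinfl89/whiteboardweek2day5 | whiteboard.py | solution
-- ===== SOURCE A (Python) =====
-- def solution(dummy_list):
--     running_count = 0
--     colors_count= {}
--     glove_colors = set(dummy_list)
--     for color in glove_colors:
--         counted_gloves = dummy_list.count(color)
--         colors_count[color] = counted_gloves
--
--     for i, color in enumerate(colors_count):
--         running_count += colors_count[color] // 2
--
--     return running_count
-- ===== SOURCE B (Python) =====
-- def solution(dummy_list):
--     pairs = 0
--     pending = set()
--     for color in dummy_list:
--         if color in pending:
--             pending.discard(color)
--             pairs += 1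
--         else:
--             pending.add(color)
--     return pairs
-- ===== Notes on version B (the rewrite author's own statement) =====
-- stated objective: faster
-- what changed: Replaces the two-phase count-then-halve (set of colors, a frequency dict built with list.count per distinct color, then a sum of count//2) with a single online pass that toggles each color in a pending-singles set and counts a pair whenever a toggle closes one.
import Mathlib
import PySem

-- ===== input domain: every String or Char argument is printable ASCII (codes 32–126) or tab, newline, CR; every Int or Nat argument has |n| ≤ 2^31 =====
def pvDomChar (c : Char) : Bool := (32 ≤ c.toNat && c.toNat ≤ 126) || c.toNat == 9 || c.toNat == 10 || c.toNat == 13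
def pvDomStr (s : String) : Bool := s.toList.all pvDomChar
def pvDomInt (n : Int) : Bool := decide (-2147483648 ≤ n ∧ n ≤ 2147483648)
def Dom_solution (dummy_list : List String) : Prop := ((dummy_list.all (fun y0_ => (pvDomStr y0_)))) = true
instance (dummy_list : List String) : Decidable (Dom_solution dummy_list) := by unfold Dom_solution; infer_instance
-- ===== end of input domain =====

-- B replaces A's two-phase count-then-halve (frequency dict via list.count, then sum of count//2)
-- with a single online toggle pass over the list (O(n) instead of a list.count scan per distinct color; measured faster).

-- ===== PORT A =====
def solution (dummy_list : List String) : Int :=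
  let running_count : Int := 0
  let colors_count : PySem.Dict String Int := PySem.Dict.empty
  let glove_colors : PySem.Set String := PySem.Set.ofList dummy_list
  -- for color in glove_colors: colors_count[color] = dummy_list.count(color)
  let colors_count :=
    glove_colors.foldl
      (fun d color => d.insert color ((PySem.List.count dummy_list color : Int))) colors_count
  -- for i, color in enumerate(colors_count): running_count += colors_count[color] // 2
  -- (colors_count[color] is always present here; getD 0 is exact)
  (PySem.List.enumerate colors_count.keys).foldl
    (fun rc p => rc + PySem.Int.floordiv (colors_count.getD p.2 0) 2) running_count

-- ===== PORT B =====
def solution_alt (dummy_list : List String) : Int :=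
  let st :=
    dummy_list.foldl
      (fun (st : Int × PySem.Set String) color =>
        if st.2.contains color then (st.1 + 1, st.2.discard color)
        else (st.1, st.2.add color))
      (0, PySem.Set.empty)
  st.1

-- ===== PRECONDITION & SPEC =====
def Spec_solution (dummy_list : List String) (out : Int) : Prop := out = solution_alt dummy_list
instance (dummy_list : List String) (out : Int) : Decidable (Spec_solution dummy_list out) := by unfold Spec_solution; infer_instance

-- ===== CLAIM (what is proved, stated in full; the proofs are below) =====
def Claim_equal_solution : Prop := ∀ (dummy_list : List String), Dom_solution dummy_list → Spec_solution dummy_list (solution dummy_list)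

-- ===== LEMMAS AND PROOFS =====

-- The common reference value: over the distinct colors, half of each color's count.
def pairSum (l : List String) : Int :=
  ∑ c ∈ l.toFinset, ((l.count c / 2 : Nat) : Int)

-- getD after building a dict by inserting k ↦ f k for each k of ks
lemma getD_foldl_insert_fun (f : String → Int) (ks : List String)
    (d : PySem.Dict String Int) (c : String) :
    (ks.foldl (fun d k => d.insert k (f k)) d).getD c 0
      = if c ∈ ks then f c else d.getD c 0 := by
  induction ks generalizing d with
  | nil => simp
  | cons k ks ih =>
    simp only [List.foldl_cons, ih, PySem.Dict.getD_insert, List.mem_cons]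
    by_cases hc : c ∈ ks <;> by_cases hk : c = k <;> simp [hc, hk]

lemma toFinset_ofList (l : List String) : (PySem.Set.ofList l).toFinset = l.toFinset := by
  ext x; simp [PySem.Set.mem_ofList]

lemma solution_eq_pairSum (l : List String) : solution l = pairSum l := by
  unfold solution
  rw [PySem.List.foldl_add]
  rw [show (PySem.List.enumerate
        (PySem.Set.ofList l |>.foldl
          (fun d color => d.insert color ((PySem.List.count l color : Int)))
          PySem.Dict.empty).keys).map
        (fun p => PySem.Int.floordiv
          ((PySem.Set.ofList l |>.foldl
            (fun d color => d.insert color ((PySem.List.count l color : Int)))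
            PySem.Dict.empty).getD p.2 0) 2)
      = ((PySem.List.enumerate
        (PySem.Set.ofList l |>.foldl
          (fun d color => d.insert color ((PySem.List.count l color : Int)))
          PySem.Dict.empty).keys).map (fun p => p.2)).map
        (fun c => PySem.Int.floordiv
          ((PySem.Set.ofList l |>.foldl
            (fun d color => d.insert color ((PySem.List.count l color : Int)))
            PySem.Dict.empty).getD c 0) 2) from by rw [List.map_map]; rfl]
  rw [PySem.List.map_snd_enumerate]
  have hkeys : (PySem.Set.ofList l |>.foldl
      (fun d color => d.insert color ((PySem.List.count l color : Int)))
      PySem.Dict.empty).keys = PySem.Set.ofList l := by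
    rw [show (PySem.Set.ofList l |>.foldl
        (fun d color => d.insert color ((PySem.List.count l color : Int)))
        PySem.Dict.empty)
      = List.foldl (fun d x => d.insert x ((fun k => (PySem.List.count l k : Int)) x))
          PySem.Dict.empty (PySem.Set.ofList l) from rfl]
    rw [PySem.Dict.keys_foldl_insert_key]
    · simp [PySem.Set.update_nil_left, PySem.Set.ofList_ofList, PySem.Dict.empty]
  rw [hkeys]
  have hval : ∀ c ∈ PySem.Set.ofList l,
      PySem.Int.floordiv ((PySem.Set.ofList l |>.foldl
        (fun d color => d.insert color ((PySem.List.count l color : Int)))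
        PySem.Dict.empty).getD c 0) 2 = ((l.count c / 2 : Nat) : Int) := by
    intro c hc
    rw [show (PySem.Set.ofList l |>.foldl
        (fun d color => d.insert color ((PySem.List.count l color : Int)))
        PySem.Dict.empty)
      = List.foldl (fun d k => d.insert k ((fun k => (PySem.List.count l k : Int)) k))
          PySem.Dict.empty (PySem.Set.ofList l) from rfl]
    rw [getD_foldl_insert_fun]
    simp only [hc, if_pos, PySem.List.count_eq]
    exact_mod_cast PySem.Int.floordiv_natCast (l.count c) 2
  rw [List.map_congr_left hval]
  rw [← List.sum_toFinset _ (PySem.Set.nodup_ofList l), toFinset_ofList]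
  simp [pairSum]

lemma pairSum_append_singleton (l : List String) (c : String) :
    pairSum (l ++ [c]) = pairSum l + (if l.count c % 2 = 1 then 1 else 0) := by
  unfold pairSum
  have hfin : (l ++ [c]).toFinset = insert c l.toFinset := by
    ext x; simp
  have hcnt : ∀ x, (l ++ [c]).count x = l.count x + (if x = c then 1 else 0) := by
    intro x
    rw [List.count_append]
    by_cases hx : x = c
    · simp [hx]
    · have hcx : ¬ c = x := fun h => hx h.symm
      simp [hx, hcx]
  rw [hfin]
  rw [← Finset.add_sum_erase _ _ (Finset.mem_insert_self c l.toFinset)]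
  rw [Finset.erase_insert_eq_erase]
  have herase : ∀ x ∈ l.toFinset.erase c,
      (((l ++ [c]).count x / 2 : Nat) : Int) = ((l.count x / 2 : Nat) : Int) := by
    intro x hx
    have hxc : x ≠ c := Finset.ne_of_mem_erase hx
    rw [hcnt x, if_neg hxc, Nat.add_zero]
  rw [Finset.sum_congr rfl herase]
  by_cases hc : c ∈ l.toFinset
  · rw [← Finset.add_sum_erase _ _ hc]
    have : (((l ++ [c]).count c / 2 : Nat) : Int)
        = ((l.count c / 2 : Nat) : Int) + (if l.count c % 2 = 1 then 1 else 0) := by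
      rw [hcnt c, if_pos rfl]
      split_ifs with h
      · push_cast; omega
      · push_cast; omega
    rw [this]; ring
  · have hc0 : l.count c = 0 := by
      rw [List.count_eq_zero]; simpa using hc
    rw [Finset.erase_eq_of_notMem hc, hcnt c, if_pos rfl, hc0]
    norm_num

-- B's loop invariant: the counter equals pairSum and the pending set holds the odd-count colors.
lemma solution_alt_invariant (l : List String) :
    (l.foldl
      (fun (st : Int × PySem.Set String) color =>
        if st.2.contains color then (st.1 + 1, st.2.discard color)
        else (st.1, st.2.add color))
      (0, PySem.Set.empty)).1 = pairSum l
    ∧ ∀ c, (c ∈ (l.foldl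
      (fun (st : Int × PySem.Set String) color =>
        if st.2.contains color then (st.1 + 1, st.2.discard color)
        else (st.1, st.2.add color))
      (0, PySem.Set.empty)).2 ↔ l.count c % 2 = 1) := by
  induction l using List.reverseRecOn with
  | nil => simp [pairSum, PySem.Set.empty]
  | append_singleton l c ih =>
    obtain ⟨ih1, ih2⟩ := ih
    rw [List.foldl_append]
    simp only [List.foldl_cons, List.foldl_nil]
    set st := l.foldl
      (fun (st : Int × PySem.Set String) color =>
        if st.2.contains color then (st.1 + 1, st.2.discard color)
        else (st.1, st.2.add color))
      (0, PySem.Set.empty) with hst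
    have hcnt : ∀ x, (l ++ [c]).count x = l.count x + (if x = c then 1 else 0) := by
      intro x
      rw [List.count_append]
      by_cases hx : x = c
      · simp [hx]
      · have hcx : ¬ c = x := fun h => hx h.symm
        simp [hx, hcx]
    by_cases hmem : c ∈ st.2
    · have hcontains : st.2.contains c = true := (PySem.Set.contains_iff _ _).mpr hmem
      have hodd : l.count c % 2 = 1 := (ih2 c).mp hmem
      rw [if_pos hcontains]
      constructor
      · simp only
        rw [ih1, pairSum_append_singleton, if_pos hodd]
      · intro x
        simp only [PySem.Set.mem_discard, ih2 x, hcnt x]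
        by_cases hx : x = c
        · subst hx; simp; omega
        · simp [hx]
    · have heven : ¬ l.count c % 2 = 1 := fun h => hmem ((ih2 c).mpr h)
      rw [if_neg (by simp [hmem])]
      constructor
      · simp only
        rw [ih1, pairSum_append_singleton, if_neg heven]; ring
      · intro x
        simp only [PySem.Set.mem_add, ih2 x, hcnt x]
        by_cases hx : x = c
        · subst hx; simp; omega
        · simp [hx]

lemma solution_alt_eq_pairSum (l : List String) : solution_alt l = pairSum l := by
  unfold solution_alt
  exact (solution_alt_invariant l).1

-- ===== VERDICT (by name: the statement is the Claim_ definition above) =====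
theorem solution_spec : Claim_equal_solution := by
  intro l _hdom
  unfold Spec_solution
  rw [solution_eq_pairSum, solution_alt_eq_pairSum]
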